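-- pv_equiv track=rewrite | github.com/va1kar1e/GoogleJam2021 | First Round/3.Reversort Engineering.py | checkProbRev
-- ===== SOURCE A (Python) =====
-- def checkProbRev(n, cost):
--   if cost < n - 1: return []
--   val = []
--   costTemp, b = 0, 1
--   for i in range(n - 1, 0, -1):
--     b += 1
--     if costTemp + i + b - 1 >= cost:
--       val += [cost - (costTemp + i - 1)] + [1 for i in range(i - 1)]
--       costTemp = cost
--       break
--     val.append(b)
--     costTemp += b
--   if costTemp < cost: return []
--   return val
-- ===== SOURCE B (Python) =====
-- def checkProbRev(n, cost):
--   if cost < n - 1 or cost > n * (n + 1) // 2 - 1: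
--     return []
--   val = []
--   budget = cost
--   for k in range(n - 1):
--     c = min(k + 2, budget - (n - 2 - k))
--     val.append(c)
--     budget -= c
--   return val
-- ===== Notes on version B (the rewrite author's own statement) =====
-- stated objective: simpler
-- what changed: B replaces A's accumulator-threshold loop with break plus a separate ones-fill comprehension and a trailing failure check by an upfront closed-form bounds test (cost in [n-1, n(n+1)/2-1]) followed by one uniform loop that assigns c = min(k+2, budget-remaining) at each step.
import Mathlib
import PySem

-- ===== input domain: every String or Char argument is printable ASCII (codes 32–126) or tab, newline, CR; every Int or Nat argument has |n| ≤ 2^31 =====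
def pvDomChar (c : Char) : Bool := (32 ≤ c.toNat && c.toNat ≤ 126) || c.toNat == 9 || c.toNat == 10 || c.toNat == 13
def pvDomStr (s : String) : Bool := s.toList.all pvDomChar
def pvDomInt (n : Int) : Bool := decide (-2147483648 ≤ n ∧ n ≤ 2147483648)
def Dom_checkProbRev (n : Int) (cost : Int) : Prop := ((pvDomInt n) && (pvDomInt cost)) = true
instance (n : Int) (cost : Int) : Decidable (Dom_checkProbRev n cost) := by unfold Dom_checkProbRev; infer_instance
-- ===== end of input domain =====

-- B replaces A's threshold-break loop + ones-fill + trailing failure check by an upfront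
-- closed-form bounds test and one uniform min-assignment loop (objective: simpler).

-- ===== PORT A =====
-- the for-loop of A: state (val, costTemp, b); 'break' returns early with costTemp set to cost
def checkProbRevLoop (cost : Int) : List Int → List Int → Int → Int → (List Int × Int)
  | [], val, costTemp, _ => (val, costTemp)
  | i :: is, val, costTemp, b =>
      let b' := b + 1
      if costTemp + i + b' - 1 ≥ cost then
        (val ++ [cost - (costTemp + i - 1)] ++ (PySem.List.pyRange 0 (i - 1) 1).map (fun _ => 1), cost)
      else
        checkProbRevLoop cost is (val ++ [b']) (costTemp + b') b'

def checkProbRev (n : Int) (cost : Int) : List Int :=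
  if cost < n - 1 then []
  else
    let r := checkProbRevLoop cost (PySem.List.pyRange (n - 1) 0 (-1)) [] 0 1
    if r.2 < cost then [] else r.1

-- ===== PORT B =====
-- the for-loop of B: state (val, budget)
def checkProbRevAltLoop (n : Int) : List Int → List Int → Int → List Int
  | [], val, _ => val
  | k :: ks, val, budget =>
      let c := min (k + 2) (budget - (n - 2 - k))
      checkProbRevAltLoop n ks (val ++ [c]) (budget - c)

def checkProbRev_alt (n : Int) (cost : Int) : List Int :=
  if cost < n - 1 ∨ cost > PySem.Int.floordiv (n * (n + 1)) 2 - 1 then []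
  else checkProbRevAltLoop n (PySem.List.pyRange 0 (n - 1) 1) [] cost

-- ===== PRECONDITION & SPEC =====
def Spec_checkProbRev (n : Int) (cost : Int) (out : List Int) : Prop := out = checkProbRev_alt n cost
instance (n : Int) (cost : Int) (out : List Int) : Decidable (Spec_checkProbRev n cost out) := by unfold Spec_checkProbRev; infer_instance

-- ===== CLAIM (what is proved, stated in full; the proofs are below) =====
def Claim_equal_checkProbRev : Prop := ∀ (n : Int) (cost : Int), Dom_checkProbRev n cost → Spec_checkProbRev n cost (checkProbRev n cost)

-- ===== LEMMAS AND PROOFS =====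

-- common abstract loop: with m steps left and current max coefficient b+1, emit min(b+1, budget-(m-1)) and recurse
def pvG : Nat → Int → Int → List Int
  | 0, _, _ => []
  | m + 1, b, budget =>
      let c := min (b + 1) (budget - m)
      c :: pvG m (b + 1) (budget - c)

-- maximal total cost of m steps starting at coefficient b+1
def pvS : Nat → Int → Int
  | 0, _ => 0
  | m + 1, b => (b + 1) + pvS m (b + 1)

theorem pvS_ge (m : Nat) (b : Int) (hb : 0 ≤ b) : (m : Int) ≤ pvS m b := by
  induction m generalizing b with
  | zero => simp [pvS]
  | succ m ih =>
      have := ih (b + 1) (by omega)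
      simp only [pvS]
      push_cast
      omega

theorem two_pvS (m : Nat) (b : Int) : 2 * pvS m b = 2 * m * b + m * (m + 1) := by
  induction m generalizing b with
  | zero => simp [pvS]
  | succ m ih =>
      have := ih (b + 1)
      simp only [pvS]
      push_cast
      push_cast at this
      ring_nf
      ring_nf at this
      omega

theorem pvG_ones (m : Nat) (b : Int) (hb : 0 ≤ b) : pvG m b (m : Int) = List.replicate m 1 := by
  induction m generalizing b with
  | zero => simp [pvG]
  | succ m ih =>
      have hmin : min (b + 1) ((m + 1 : Nat) - (m : Int)) = 1 := by push_cast; omega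
      simp only [pvG, Nat.cast_add, Nat.cast_one] at *
      rw [show ((m : Int) + 1 - (m : Int)) = 1 by ring] at *
      have h1 : min (b + 1) (1 : Int) = 1 := by omega
      rw [h1, show ((m : Int) + 1 - 1) = (m : Int) by ring, ih (b + 1) (by omega)]
      rfl

theorem ones_map (x : Int) : (PySem.List.pyRange 0 x 1).map (fun _ => (1 : Int)) = List.replicate x.toNat 1 := by
  rw [PySem.List.pyRange_one]
  simp [List.eq_replicate_iff]

-- A's loop when the break never fires: it just accumulates the maximal cost pvS m b
theorem loopA_noBreak (cost : Int) (m : Nat) (b ct : Int) (val : List Int) (hb : 0 ≤ b)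
    (h : ct + pvS m b < cost) :
    (checkProbRevLoop cost (PySem.List.pyRange (m : Int) 0 (-1)) val ct b).2 = ct + pvS m b := by
  induction m generalizing b ct val with
  | zero => simp [PySem.List.pyRange_neg_one_eq_nil, checkProbRevLoop, pvS]
  | succ m ih =>
      rw [show ((m + 1 : Nat) : Int) = (m : Int) + 1 by push_cast; ring,
        PySem.List.pyRange_neg_one_cons (by positivity)]
      have hS := pvS_ge m (b + 1) (by omega)
      have hnb : ¬ (ct + ((m : Int) + 1) + (b + 1) - 1 ≥ cost) := by
        simp only [pvS] at h; omega
      simp only [checkProbRevLoop]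
      rw [if_neg hnb, show (m : Int) + 1 - 1 = (m : Int) by ring,
        ih (b + 1) (ct + (b + 1)) (val ++ [b + 1]) (by omega) (by simp only [pvS] at h; omega)]
      simp only [pvS]
      ring

-- A's loop in the feasible window equals the abstract loop pvG
theorem loopA_main (cost : Int) (m : Nat) (b ct : Int) (val : List Int) (hb : 0 ≤ b)
    (hlo : (m : Int) ≤ cost - ct) (hhi : cost - ct ≤ pvS m b) :
    checkProbRevLoop cost (PySem.List.pyRange (m : Int) 0 (-1)) val ct b
      = (val ++ pvG m b (cost - ct), cost) := by
  induction m generalizing b ct val with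
  | zero =>
      simp only [pvS] at hhi
      simp only [Nat.cast_zero] at hlo
      have : ct = cost := by omega
      simp [PySem.List.pyRange_neg_one_eq_nil, checkProbRevLoop, pvG, this]
  | succ m ih =>
      rw [show ((m + 1 : Nat) : Int) = (m : Int) + 1 by push_cast; ring,
        PySem.List.pyRange_neg_one_cons (by positivity)]
      simp only [checkProbRevLoop, pvG]
      by_cases hbr : ct + ((m : Int) + 1) + (b + 1) - 1 ≥ cost
      · rw [if_pos hbr]
        have hc : min (b + 1) (cost - ct - (m : Int)) = cost - ct - (m : Int) := by omega
        rw [hc, show cost - ct - (cost - ct - (m : Int)) = (m : Int) by ring,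
          pvG_ones m (b + 1) (by omega), show (m : Int) + 1 - 1 = (m : Int) by ring,
          ones_map, Int.toNat_natCast,
          show cost - (ct + ((m : Int) + 1) - 1) = cost - ct - (m : Int) by ring]
        simp
      · rw [if_neg hbr]
        push Not at hbr
        have hc : min (b + 1) (cost - ct - (m : Int)) = b + 1 := by omega
        have hrec := ih (b + 1) (ct + (b + 1)) (val ++ [b + 1]) (by omega)
          (by push_cast at hlo ⊢; omega) (by simp only [pvS] at hhi; omega)
        rw [hc, show (m : Int) + 1 - 1 = (m : Int) by ring, hrec,
          show cost - (ct + (b + 1)) = cost - ct - (b + 1) by ring]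
        simp

-- B's loop equals the abstract loop pvG
theorem loopB_main (n : Int) (m : Nat) (val : List Int) (budget : Int) (h : (m : Int) ≤ n - 1) :
    checkProbRevAltLoop n (PySem.List.pyRange (n - 1 - (m : Int)) (n - 1) 1) val budget
      = val ++ pvG m (n - (m : Int)) budget := by
  induction m generalizing val budget with
  | zero =>
      rw [show n - 1 - ((0 : Nat) : Int) = n - 1 by simp, PySem.List.pyRange_one_eq_nil le_rfl]
      simp [checkProbRevAltLoop, pvG]
  | succ m ih =>
      rw [PySem.List.pyRange_one_cons (by push_cast; omega)]
      simp only [checkProbRevAltLoop, pvG, Nat.cast_add, Nat.cast_one]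
      have h2 : n - 1 - ((m : Int) + 1) + 2 = n - ((m : Int) + 1) + 1 := by ring
      have h3 : budget - (n - 2 - (n - 1 - ((m : Int) + 1))) = budget - (m : Int) := by ring
      rw [h2, h3, show n - 1 - ((m : Int) + 1) + 1 = n - 1 - (m : Int) by ring,
        ih _ _ (by push_cast at h ⊢; omega), show n - ((m : Int) + 1) + 1 = n - (m : Int) by ring]
      simp

theorem floordiv_bound (n : Int) (hn : 2 ≤ n) :
    PySem.Int.floordiv (n * (n + 1)) 2 - 1 = pvS (n - 1).toNat 1 := by
  have hm : ((n - 1).toNat : Int) = n - 1 := by omega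
  have h2 : 2 * pvS (n - 1).toNat 1 = 2 * (n - 1) * 1 + (n - 1) * ((n - 1) + 1) := by
    rw [two_pvS, hm]
  have hmul : n * (n + 1) = 2 * (pvS (n - 1).toNat 1 + 1) := by ring_nf; ring_nf at h2; omega
  rw [PySem.Int.floordiv_eq_ediv_of_pos (by norm_num), hmul, Int.mul_ediv_cancel_left _ (by norm_num)]
  ring

-- ===== VERDICT (by name: the statement is the Claim_ definition above) =====
theorem checkProbRev_spec : Claim_equal_checkProbRev := by
  intro n cost _
  unfold Spec_checkProbRev checkProbRev checkProbRev_alt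
  by_cases hlo : cost < n - 1
  · simp [hlo]
  · rw [if_neg hlo]
    push Not at hlo
    by_cases hn : n ≤ 1
    · -- both loops run over an empty range; A's trailing check and B's guard both yield []
      rw [PySem.List.pyRange_neg_one_eq_nil (by omega)]
      simp only [checkProbRevLoop, ite_self]
      by_cases hg : cost < n - 1 ∨ cost > PySem.Int.floordiv (n * (n + 1)) 2 - 1
      · rw [if_pos hg]
      · rw [if_neg hg, PySem.List.pyRange_one_eq_nil (by omega)]
        simp [checkProbRevAltLoop]
    · push Not at hn
      have hn2 : 2 ≤ n := by omega
      have hm : (((n - 1).toNat : Int)) = n - 1 := by omega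
      rw [floordiv_bound n hn2]
      by_cases hhi : cost > pvS (n - 1).toNat 1
      · -- A: the break never fires and the trailing check returns []; B: the upper-bound guard fires
        rw [if_pos (Or.inr hhi), ← hm]
        have h2 := loopA_noBreak cost ((n - 1).toNat) 1 0 [] (by norm_num) (by omega)
        rw [if_pos (show (checkProbRevLoop cost
          (PySem.List.pyRange (((n - 1).toNat : Int)) 0 (-1)) [] 0 1).2 < cost by rw [h2]; omega)]
      · -- feasible window: both loops compute pvG
        push Not at hhi
        rw [if_neg (show ¬ (cost < n - 1 ∨ cost > pvS (n - 1).toNat 1) by push Not; exact ⟨hlo, hhi⟩)]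
        have hA := loopA_main cost ((n - 1).toNat) 1 0 [] (by norm_num) (by omega) (by omega)
        rw [hm, show cost - 0 = cost by ring] at hA
        have hB := loopB_main n ((n - 1).toNat) [] cost (by omega)
        rw [show n - 1 - (((n - 1).toNat : Int)) = 0 by omega,
          show n - (((n - 1).toNat : Int)) = 1 by omega] at hB
        rw [hA, hB]
        simp
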